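-- pv_equiv track=rewrite | github.com/rianmatos2412-code/trading_support_dashboard | services/ingestion-service/services/coingecko_service.py | normalize_base_asset
-- ===== SOURCE A (Python) =====
-- def normalize_base_asset(base_asset: str) -> str:
--     """Normalize base asset by removing common multiplier prefixes.
--
--     Binance often uses multiplier prefixes (1000, 100, 10) for tokens with small unit prices.
--     This function removes these prefixes to match with CoinGecko ticker symbols.
--
--     Examples:
--         "1000PEPE" -> "PEPE"
--         "100SHIB" -> "SHIB"
--         "10LUNC" -> "LUNC"
--         "BTC" -> "BTC" (no change)
--
--     Args:
--         base_asset: Base asset string, may contain multiplier prefix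
--
--     Returns:
--         Normalized base asset without multiplier prefix
--     """
--     base_upper = base_asset.upper()
--
--     # Common multiplier prefixes used by Binance
--     multipliers = ["1000000", "1000",  "10"]
--
--     for multiplier in multipliers:
--         if base_upper.startswith(multiplier):
--             # Check if the rest is a valid ticker (at least 2 chars)
--             remaining = base_upper[len(multiplier):]
--             if len(remaining) >= 2:
--                 return remaining
--
--     return base_upper
-- ===== SOURCE B (Python) =====
-- def normalize_base_asset(base_asset: str) -> str:
--     """Strip a Binance multiplier prefix ('1' + 6/3/1 zeros) by counting the
--     leading-zero run after an initial '1', instead of testing prefixes in a loop."""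
--     u = base_asset.upper()
--     if not u.startswith('1'):
--         return u
--     tail = u[1:]
--     run = next((i for i, c in enumerate(tail) if c != '0'), len(tail))
--     n = len(u)
--     k = 6 if (run >= 6 and n >= 9) else 3 if (run >= 3 and n >= 6) else 1 if (run >= 1 and n >= 4) else 0
--     return u[1 + k:] if k else u
-- ===== Notes on version B (the rewrite author's own statement) =====
-- stated objective: alternative
-- what changed: Instead of testing the three multiplier prefixes one by one with startswith and falling through, B counts the leading-zero run after a leading digit one once and picks the prefix length (6, 3, 1 or 0 zeros) arithmetically from that run and the total length.
import Mathlib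
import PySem

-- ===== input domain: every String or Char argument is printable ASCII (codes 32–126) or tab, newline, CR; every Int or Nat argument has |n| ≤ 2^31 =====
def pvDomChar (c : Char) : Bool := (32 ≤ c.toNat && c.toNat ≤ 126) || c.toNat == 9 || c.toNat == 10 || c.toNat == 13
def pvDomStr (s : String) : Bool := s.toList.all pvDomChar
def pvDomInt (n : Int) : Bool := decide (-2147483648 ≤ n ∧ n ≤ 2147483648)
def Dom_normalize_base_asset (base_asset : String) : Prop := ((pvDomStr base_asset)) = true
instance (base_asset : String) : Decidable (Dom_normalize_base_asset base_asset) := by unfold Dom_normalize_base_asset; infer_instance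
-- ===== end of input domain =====

-- B replaces A's prefix-by-prefix startswith loop with a single count of the
-- leading-zero run after the leading digit plus arithmetic on that run (objective: alternative).

-- ===== PORT A =====
-- the for-loop over `multipliers` with its early return
def pvLoopA (base_upper : String) : List String → String
  | [] => base_upper
  | multiplier :: rest =>
    if PySem.Str.startswith base_upper multiplier then
      let remaining := PySem.Str.slice base_upper (some (PySem.Str.len multiplier : Int)) none
      if 2 ≤ PySem.Str.len remaining then remaining
      else pvLoopA base_upper rest
    else pvLoopA base_upper rest

def normalize_base_asset (base_asset : String) : String :=
  let base_upper := PySem.Str.upper base_asset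
  let multipliers : List String := ["1000000", "1000", "10"]
  pvLoopA base_upper multipliers

-- ===== PORT B =====
-- run = next((i for i, c in enumerate(tail) if c != '0'), len(tail)) is the index of the
-- first non-'0' char of tail, i.e. the length of tail's leading run of '0'; ported by hand
-- (exactly that value) as the length of takeWhile (· == '0').
def normalize_base_asset_alt (base_asset : String) : String :=
  let u := PySem.Str.upper base_asset
  if PySem.Str.startswith u "1" then
    let tail := PySem.Str.slice u (some 1) none
    let run : Int := ((tail.toList.takeWhile (fun c => c == '0')).length : Int)
    let n : Int := (PySem.Str.len u : Int)
    let k : Int := if 6 ≤ run ∧ 9 ≤ n then 6 else if 3 ≤ run ∧ 6 ≤ n then 3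
                   else if 1 ≤ run ∧ 4 ≤ n then 1 else 0
    if k ≠ 0 then PySem.Str.slice u (some (1 + k)) none else u
  else u

-- ===== PRECONDITION & SPEC =====
def Spec_normalize_base_asset (base_asset : String) (out : String) : Prop := out = normalize_base_asset_alt base_asset
instance (base_asset : String) (out : String) : Decidable (Spec_normalize_base_asset base_asset out) := by unfold Spec_normalize_base_asset; infer_instance

-- ===== CLAIM (what is proved, stated in full; the proofs are below) =====
def Claim_equal_normalize_base_asset : Prop := ∀ (base_asset : String), Dom_normalize_base_asset base_asset → Spec_normalize_base_asset base_asset (normalize_base_asset base_asset)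

-- ===== LEMMAS AND PROOFS =====

-- a run of m zeros is a prefix of t iff t's leading-zero run has length ≥ m
lemma replicate_zero_prefix_iff (m : Nat) (t : List Char) :
    List.replicate m '0' <+: t ↔ m ≤ (t.takeWhile (fun c => c == '0')).length := by
  induction m generalizing t with
  | zero => simp
  | succ m ih =>
    cases t with
    | nil => simp [List.replicate_succ]
    | cons c t' =>
      by_cases hc : c = '0'
      · subst hc
        simp [List.replicate_succ, List.cons_prefix_cons, ih]
      · have hb : (c == '0') = false := by simp [hc]
        simp [List.replicate_succ, List.cons_prefix_cons, hb]
        exact fun h => absurd h.symm hc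

lemma chars_sw_false (s p : List Char) (h : ¬ p <+: s) : PySem.Chars.startswith s p = false := by
  rw [← Bool.not_eq_true, PySem.Chars.startswith_iff]; exact h

-- startswith ('1' followed by m zeros) is exactly "the leading-zero run of the tail has length ≥ m"
lemma chars_sw_run (t : List Char) (m : Nat) :
    PySem.Chars.startswith ('1' :: t) ('1' :: List.replicate m '0') =
      decide (m ≤ (t.takeWhile (fun c => c == '0')).length) := by
  by_cases h : m ≤ (t.takeWhile (fun c => c == '0')).length
  · have hp := (replicate_zero_prefix_iff m t).mpr h
    simp [PySem.Chars.startswith_iff, List.cons_prefix_cons, hp, h]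
  · simp only [h, decide_false]
    exact chars_sw_false _ _ (by
      rw [List.cons_prefix_cons]
      rintro ⟨-, hp⟩
      exact h ((replicate_zero_prefix_iff m t).mp hp))

-- the core equivalence, for an arbitrary string u in the role of base_upper
set_option maxHeartbeats 2000000 in
lemma core_eq (u : String) :
    pvLoopA u ["1000000", "1000", "10"] =
      (if PySem.Str.startswith u "1" then
        let tail := PySem.Str.slice u (some 1) none
        let run : Int := ((tail.toList.takeWhile (fun c => c == '0')).length : Int)
        let n : Int := (PySem.Str.len u : Int)
        let k : Int := if 6 ≤ run ∧ 9 ≤ n then 6 else if 3 ≤ run ∧ 6 ≤ n then 3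
                       else if 1 ≤ run ∧ 4 ≤ n then 1 else 0
        if k ≠ 0 then PySem.Str.slice u (some (1 + k)) none else u
      else u) := by
  have bridge : ∀ p : String, PySem.Str.startswith u p = PySem.Chars.startswith u.toList p.toList := by
    intro p; simp
  cases hu : u.toList with
  | nil =>
    have hf : ∀ p : String, p.toList ≠ [] → PySem.Str.startswith u p = false := by
      intro p hp
      rw [bridge, hu]
      exact chars_sw_false _ _ (fun h => hp (List.prefix_nil.mp h))
    simp only [pvLoopA]
    rw [hf "1000000" (by decide), hf "1000" (by decide), hf "10" (by decide), hf "1" (by decide)]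
    simp
  | cons c t =>
    by_cases hc : c = '1'
    · subst hc
      have h7 : PySem.Str.startswith u "1000000" = decide (6 ≤ (t.takeWhile (fun c => c == '0')).length) := by
        rw [bridge, hu, show ("1000000" : String).toList = '1' :: List.replicate 6 '0' by decide, chars_sw_run]
      have h4 : PySem.Str.startswith u "1000" = decide (3 ≤ (t.takeWhile (fun c => c == '0')).length) := by
        rw [bridge, hu, show ("1000" : String).toList = '1' :: List.replicate 3 '0' by decide, chars_sw_run]
      have h2 : PySem.Str.startswith u "10" = decide (1 ≤ (t.takeWhile (fun c => c == '0')).length) := by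
        rw [bridge, hu, show ("10" : String).toList = '1' :: List.replicate 1 '0' by decide, chars_sw_run]
      have h1 : PySem.Str.startswith u "1" = true := by
        rw [bridge, hu, PySem.Chars.startswith_iff]
        simp
      have hL7 : PySem.Str.len "1000000" = 7 := by decide
      have hL4 : PySem.Str.len "1000" = 4 := by decide
      have hL2 : PySem.Str.len "10" = 2 := by decide
      have hl7 : PySem.Str.len (PySem.Str.slice u (some 7) none) = ((u.toList.length - 7 : Nat) : Int) := by
        rw [PySem.Str.len_eq]; simp [PySem.List.slice_from]
      have hl4 : PySem.Str.len (PySem.Str.slice u (some 4) none) = ((u.toList.length - 4 : Nat) : Int) := by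
        rw [PySem.Str.len_eq]; simp [PySem.List.slice_from]
      have hl2 : PySem.Str.len (PySem.Str.slice u (some 2) none) = ((u.toList.length - 2 : Nat) : Int) := by
        rw [PySem.Str.len_eq]; simp [PySem.List.slice_from]
      have htail : (PySem.Str.slice u (some 1) none).toList = t := by
        simp [PySem.List.slice_from, hu]
      have hlen : u.toList.length = t.length + 1 := by rw [hu]; rfl
      simp only [pvLoopA]
      rw [hL7, hL4, hL2, h7, h4, h2, h1, hl7, hl4, hl2, htail, PySem.Str.len_eq, hlen]
      simp only [decide_eq_true_eq, if_true]
      split_ifs <;> first | rfl | (exfalso; omega)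
    · have hf : ∀ (p : String) (rest : List Char), p.toList = '1' :: rest → PySem.Str.startswith u p = false := by
        intro p rest hp
        rw [bridge, hu]
        exact chars_sw_false _ _ (by
          rw [hp, List.cons_prefix_cons]
          rintro ⟨h, -⟩
          exact hc h.symm)
      simp only [pvLoopA]
      rw [hf "1000000" (List.replicate 6 '0') (by decide), hf "1000" (List.replicate 3 '0') (by decide),
          hf "10" (List.replicate 1 '0') (by decide), hf "1" [] (by decide)]
      simp

-- ===== VERDICT (by name: the statement is the Claim_ definition above) =====
theorem normalize_base_asset_spec : Claim_equal_normalize_base_asset := by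
  intro base_asset _
  unfold Spec_normalize_base_asset normalize_base_asset normalize_base_asset_alt
  exact core_eq (PySem.Str.upper base_asset)
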